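-- pv_equiv track=rewrite | github.com/M-Nisar-07/kimase_site_crosstalk | utils_diff.py | get_nud
-- ===== SOURCE A (Python) =====
-- def remove_dup(list_of_dicts):
--     unique_dicts_set = {frozenset(d.items()) for d in list_of_dicts}
--     unique_dicts = [dict(s) for s in unique_dicts_set]
--     return unique_dicts
--
-- def get_nud(s1,s2):
--
--     list_of_dicts = []
--
--     for s1s in s1:
--         c1,e1 = next(iter(s1s.items()))
--         if (e1 == "Up-regulated"):
--             list_of_dicts.append(s1s)
--
--     for s2s in s2:
--         c2,e2 = next(iter(s2s.items()))
--         if (e2 == "down-regulated"):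
--             list_of_dicts.append(s2s)
--
--     return (len(remove_dup(list_of_dicts)))
-- ===== SOURCE B (Python) =====
-- def get_nud(s1, s2):
--     # Count equivalence classes of matching dicts by repeated representative
--     # removal: take the first candidate, drop every candidate with the same
--     # item set, count one class; repeat. No set/frozenset machinery at all.
--     def same(d, e):
--         di, ei = list(d.items()), list(e.items())
--         return all(p in ei for p in di) and all(p in di for p in ei)
--
--     cand = [d for d in s1 if next(iter(d.items()))[1] == "Up-regulated"]
--     cand += [d for d in s2 if next(iter(d.items()))[1] == "down-regulated"]
--     n = 0
--     while cand:
--         d = cand[0]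
--         cand = [e for e in cand[1:] if not same(d, e)]
--         n += 1
--     return n
-- ===== Notes on version B (the rewrite author's own statement) =====
-- stated objective: alternative
-- what changed: A collects matches with two append loops, hash-deduplicates them through a set of frozensets, rebuilds a list of dicts and returns its length; B never builds a set or frozenset: it counts equivalence classes directly by repeatedly taking the first remaining candidate as a representative and filtering out every candidate with an equal item set (comparison-based class-removal loop instead of hash dedup).
import Mathlib
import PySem

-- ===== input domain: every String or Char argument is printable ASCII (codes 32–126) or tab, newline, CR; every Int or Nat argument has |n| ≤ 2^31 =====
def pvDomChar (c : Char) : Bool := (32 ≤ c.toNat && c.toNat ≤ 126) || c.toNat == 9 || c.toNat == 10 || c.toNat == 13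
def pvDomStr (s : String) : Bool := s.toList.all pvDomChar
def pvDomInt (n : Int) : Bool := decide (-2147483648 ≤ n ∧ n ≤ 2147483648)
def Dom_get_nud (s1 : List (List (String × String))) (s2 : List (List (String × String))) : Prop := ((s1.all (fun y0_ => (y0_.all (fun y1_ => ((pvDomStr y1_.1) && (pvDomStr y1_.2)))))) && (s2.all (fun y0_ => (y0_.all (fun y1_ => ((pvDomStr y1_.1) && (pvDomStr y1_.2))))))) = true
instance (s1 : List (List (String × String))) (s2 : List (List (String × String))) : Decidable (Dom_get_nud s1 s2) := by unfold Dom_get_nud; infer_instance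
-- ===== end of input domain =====

-- B replaces A's collect-then-hash-dedup (set of frozensets, rebuild, len) by a
-- comparison-based class-removal loop counting equivalence classes directly;
-- objective: alternative (no speed claim).

-- ===== PORT A =====
-- frozenset(a) == frozenset(b) for the items lists of two dicts: equality as
-- SETS of pairs (hand-rolled: frozenset equality is set equality of the pair
-- lists; exact because dict item lists have no duplicates).
def pvFsEq (a b : List (String × String)) : Bool :=
  a.all (fun p => b.contains p) && b.all (fun p => a.contains p)

-- body of each of A's two collect loops: take the first (key, value) of the
-- dict, append the dict if the value equals tag
def pvCollect (tag : String) (acc : List (PySem.Dict String String))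
    (l : List (String × String)) : List (PySem.Dict String String) :=
  let d := PySem.Dict.ofList l   -- each Python dict argument arrives as its pair list
  match d.items with
  | [] => acc          -- next(iter(d.items())) raises StopIteration: excluded by Pre_
  | (_, e) :: _ => if e == tag then acc ++ [d] else acc

-- body of remove_dup's set comprehension: a dict enters the set iff no dict
-- with an equal frozenset of items is already there
def pvDedupStep (acc : List (PySem.Dict String String)) (d : PySem.Dict String String) :
    List (PySem.Dict String String) :=
  if acc.any (fun x => pvFsEq d.items x.items) then acc else acc ++ [d]

-- remove_dup: {frozenset(d.items()) for d in lod} keeps one dict per distinct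
-- frozenset; the rebuilt list of dicts has one entry per distinct frozenset
def remove_dup (lod : List (PySem.Dict String String)) : List (PySem.Dict String String) :=
  lod.foldl pvDedupStep []

def get_nud (s1 : List (List (String × String))) (s2 : List (List (String × String))) : Int :=
  let lod1 := s1.foldl (pvCollect "Up-regulated") []
  let lod := s2.foldl (pvCollect "down-regulated") lod1
  ((remove_dup lod).length : Int)

-- ===== PORT B =====
-- same(d, e): each item of d is among e's items and vice versa
def pvSame (a b : List (String × String)) : Bool :=
  a.all (fun p => b.contains p) && b.all (fun p => a.contains p)

-- one candidate comprehension: [d for d in s if next(iter(d.items()))[1] == tag]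
def pvCands (tag : String) (s : List (List (String × String))) :
    List (PySem.Dict String String) :=
  s.filterMap (fun l =>
    let d := PySem.Dict.ofList l
    match d.items with
    | [] => none       -- next(iter(d.items())) raises StopIteration: excluded by Pre_
    | (_, e) :: _ => if e == tag then some d else none)

-- the while loop: pick the first remaining candidate, drop its whole
-- equivalence class, count one class
def pvCountClasses : List (PySem.Dict String String) → Int
  | [] => 0
  | d :: rest => 1 + pvCountClasses (rest.filter (fun e => !(pvSame d.items e.items)))
termination_by l => l.length
decreasing_by
  simp
  exact (List.length_filter_le _ _).trans (by simp)

def get_nud_alt (s1 : List (List (String × String))) (s2 : List (List (String × String))) : Int :=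
  pvCountClasses (pvCands "Up-regulated" s1 ++ pvCands "down-regulated" s2)

-- ===== PRECONDITION & SPEC =====
-- Pre_ excludes inputs containing an empty dict: there next(iter(d.items()))
-- raises StopIteration in A (and in B likewise), so A returns no value.
def Pre_get_nud (s1 : List (List (String × String))) (s2 : List (List (String × String))) : Prop :=
  (∀ l ∈ s1, l ≠ []) ∧ (∀ l ∈ s2, l ≠ [])
instance (s1 : List (List (String × String))) (s2 : List (List (String × String))) : Decidable (Pre_get_nud s1 s2) := by unfold Pre_get_nud; infer_instance

def pvWitness_get_nud : (List (List (String × String))) × (List (List (String × String))) :=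
  ([[("g1", "Up-regulated")], [("g2", "x")]], [[("g3", "down-regulated")]])

def Spec_get_nud (s1 : List (List (String × String))) (s2 : List (List (String × String))) (out : Int) : Prop := out = get_nud_alt s1 s2
instance (s1 : List (List (String × String))) (s2 : List (List (String × String))) (out : Int) : Decidable (Spec_get_nud s1 s2 out) := by unfold Spec_get_nud; infer_instance

-- ===== CLAIM (what is proved, stated in full; the proofs are below) =====
def Claim_equal_get_nud : Prop := ∀ (s1 : List (List (String × String))) (s2 : List (List (String × String))), Dom_get_nud s1 s2 → Pre_get_nud s1 s2 → Spec_get_nud s1 s2 (get_nud s1 s2)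

-- ===== LEMMAS AND PROOFS =====

theorem pvCountClasses_cons (d : PySem.Dict String String)
    (rest : List (PySem.Dict String String)) :
    pvCountClasses (d :: rest)
      = 1 + pvCountClasses (rest.filter (fun e => !(pvSame d.items e.items))) := by
  rw [pvCountClasses.eq_def]

theorem pvFsEq_comm (a b : List (String × String)) : pvFsEq a b = pvFsEq b a := by
  simp [pvFsEq, Bool.and_comm]

-- A's collect loop = acc ++ B's comprehension
theorem pvCollect_eq_cands (tag : String) (s : List (List (String × String)))
    (acc : List (PySem.Dict String String)) :
    s.foldl (pvCollect tag) acc = acc ++ pvCands tag s := by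
  induction s generalizing acc with
  | nil => simp [pvCands]
  | cons l s ih =>
      rw [List.foldl_cons, ih]
      cases h : (PySem.Dict.ofList l).items with
      | nil => simp [pvCollect, pvCands, h]
      | cons p rest =>
          obtain ⟨k, e⟩ := p
          by_cases he : e = tag <;> simp [pvCollect, pvCands, h, he]

-- invariant: A's dedup fold extends acc by one entry per equivalence class of
-- the not-yet-represented elements, which is what B's loop counts
theorem pvDedup_length (lod : List (PySem.Dict String String))
    (acc : List (PySem.Dict String String)) :
    ((lod.foldl pvDedupStep acc).length : Int)
      = (acc.length : Int)
        + pvCountClasses (lod.filter (fun d => !acc.any (fun x => pvFsEq d.items x.items))) := by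
  induction hn : lod.length using Nat.strong_induction_on generalizing lod acc with
  | _ n ih =>
  cases lod with
  | nil => simp [pvCountClasses.eq_1]
  | cons d rest =>
    rw [List.foldl_cons]
    by_cases hd : rest.length < n
    case neg => simp at hn; omega
    by_cases h : acc.any (fun x => pvFsEq d.items x.items)
    · -- d already represented: acc unchanged, d filtered away
      have : pvDedupStep acc d = acc := by simp [pvDedupStep, h]
      rw [this, ih rest.length hd rest acc rfl]
      simp [h]
    · -- new class: acc grows by d; the later duplicates of d drop out
      have hstep : pvDedupStep acc d = acc ++ [d] := by simp [pvDedupStep, h]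
      rw [hstep, ih rest.length hd rest (acc ++ [d]) rfl]
      have hfil : (d :: rest).filter (fun x => !acc.any (fun y => pvFsEq x.items y.items))
          = d :: rest.filter (fun x => !acc.any (fun y => pvFsEq x.items y.items)) := by
        simp [h]
      rw [hfil, pvCountClasses_cons]
      have hpred : rest.filter (fun x => !(acc ++ [d]).any (fun y => pvFsEq x.items y.items))
          = (rest.filter (fun x => !acc.any (fun y => pvFsEq x.items y.items))).filter
              (fun e => !(pvSame d.items e.items)) := by
        rw [List.filter_filter]
        apply List.filter_congr
        intro e _
        have : pvSame d.items e.items = pvFsEq e.items d.items := by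
          rw [← pvFsEq_comm]; rfl
        simp [this, Bool.and_comm]
      rw [hpred]
      simp only [List.length_append, List.length_cons, List.length_nil]
      push_cast
      ring

-- ===== VERDICT (by name: the statement is the Claim_ definition above) =====
theorem get_nud_spec : Claim_equal_get_nud := by
  intro s1 s2 _ _
  show ((remove_dup (List.foldl (pvCollect "down-regulated")
        (List.foldl (pvCollect "Up-regulated") [] s1) s2)).length : Int)
      = pvCountClasses (pvCands "Up-regulated" s1 ++ pvCands "down-regulated" s2)
  rw [pvCollect_eq_cands, pvCollect_eq_cands, List.nil_append]
  unfold remove_dup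
  rw [pvDedup_length]
  simp
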